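-- pv_equiv track=rewrite | github.com/ToolDelta-Basic/PluginMarket | MCAgent/agent.py | _limit_conversation_history
-- ===== SOURCE A (Python) =====
-- def _limit_conversation_history(
--     messages: list,
--     max_history_length: int,
--     player_name: str = "未知玩家"
-- ) -> list:
--     """Limit conversation history to specified length"""
--     if not messages:
--         return messages
--
--     system_msg = (
--         messages[0] if messages and messages[0].get("role") == "system"
--         else None
--     )
--     non_system_messages = messages[1:] if system_msg else messages
--
--     user_message_count = sum(
--         1 for msg in non_system_messages if msg.get("role") == "user"
--     )
--
--     if user_message_count <= max_history_length:
--         return messages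
--
--     users_to_remove = user_message_count - max_history_length
--     user_count = 0
--     cutoff_index = 0
--
--     for i, msg in enumerate(non_system_messages):
--         if msg.get("role") == "user":
--             user_count += 1
--             if user_count > users_to_remove:
--                 cutoff_index = i
--                 break
--
--     recent_messages = non_system_messages[cutoff_index:]
--
--     if system_msg:
--         limited_messages = [system_msg] + recent_messages
--     else:
--         limited_messages = recent_messages
--
--     return limited_messages
-- ===== SOURCE B (Python) =====
-- def _limit_conversation_history(
--     messages: list,
--     max_history_length: int,
--     player_name: str = "未知玩家"
-- ) -> list:
--     # Backward scan with early exit: walk the non-system messages from the end,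
--     # counting user messages; once one more than max_history_length is seen,
--     # cut at the previously seen user message.
--     if not messages or max_history_length <= 0:
--         return messages
--     sys_part = [messages[0]] if messages[0].get("role") == "system" else []
--     body = messages[len(sys_part):]
--     users = 0
--     cut = None
--     for i in range(len(body) - 1, -1, -1):
--         if body[i].get("role") == "user":
--             users += 1
--             if users > max_history_length:
--                 return sys_part + body[cut:]
--             cut = i
--     return messages
-- ===== Notes on version B (the rewrite author's own statement) =====
-- stated objective: alternative
-- what changed: Replaces A's two forward passes (count all users, then rescan with a break to find the cutoff) by a single backward scan over the non-system messages that stops as soon as one more than max_history_length user messages have been seen, cutting at the previously seen user message.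
import Mathlib
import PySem

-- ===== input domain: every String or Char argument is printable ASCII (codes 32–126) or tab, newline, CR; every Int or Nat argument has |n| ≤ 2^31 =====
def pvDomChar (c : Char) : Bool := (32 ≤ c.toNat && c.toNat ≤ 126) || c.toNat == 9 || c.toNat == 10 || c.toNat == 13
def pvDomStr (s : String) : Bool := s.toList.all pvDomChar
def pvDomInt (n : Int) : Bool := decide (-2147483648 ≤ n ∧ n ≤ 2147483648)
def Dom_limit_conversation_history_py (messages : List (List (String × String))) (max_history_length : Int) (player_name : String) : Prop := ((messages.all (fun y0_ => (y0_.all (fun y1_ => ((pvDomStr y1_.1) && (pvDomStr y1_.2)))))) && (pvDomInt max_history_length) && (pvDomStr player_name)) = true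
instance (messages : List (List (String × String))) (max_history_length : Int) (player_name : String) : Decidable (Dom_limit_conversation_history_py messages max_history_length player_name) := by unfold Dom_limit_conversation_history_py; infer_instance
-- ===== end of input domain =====

-- B replaces A's two forward passes (count users, rescan with break) by one backward scan with early exit; objective: alternative.

-- ===== PORT A =====
-- A's `for i, msg in enumerate(non_system): if role == "user": user_count += 1; if user_count > users_to_remove: cutoff_index = i; break`
-- (cutoff_index stays 0 if the loop never breaks)
def pvALoop (xs : List (List (String × String))) (users_to_remove : Int) (user_count : Int) (i : Nat) : Nat :=
  match xs with
  | [] => 0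
  | m :: rest =>
    if (PySem.Dict.mk m).get? "role" = some "user" then
      if user_count + 1 > users_to_remove then i
      else pvALoop rest users_to_remove (user_count + 1) (i + 1)
    else pvALoop rest users_to_remove user_count (i + 1)

def limit_conversation_history_py (messages : List (List (String × String))) (max_history_length : Int) (player_name : String) : List (List (String × String)) :=
  match messages with
  | [] => messages   -- `if not messages: return messages`
  | m0 :: _ =>
    -- `if msg.get("role") == "system"`; a dict holding "role" is nonempty, so `if system_msg:` ↔ isSome
    let system_msg : Option (List (String × String)) :=
      if (PySem.Dict.mk m0).get? "role" = some "system" then some m0 else none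
    let non_system_messages :=
      if system_msg.isSome then PySem.List.slice messages (some 1) none else messages
    let user_message_count : Int :=
      ((non_system_messages.filter (fun m => (PySem.Dict.mk m).get? "role" = some "user")).length : Int)
    if user_message_count ≤ max_history_length then messages
    else
      let users_to_remove := user_message_count - max_history_length
      let cutoff_index := pvALoop non_system_messages users_to_remove 0 0
      let recent_messages := PySem.List.slice non_system_messages (some (cutoff_index : Int)) none
      if system_msg.isSome then
        (system_msg.getD []) :: recent_messages
      else recent_messages

-- ===== PORT B =====
-- B's `for i in range(len(body) - 1, -1, -1): …`: walk the body backwards carrying the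
-- descending index i, the user counter and the last-seen user position `cut`;
-- `some c` means `return sys_part + body[c:]` fired, `none` means the loop completed.
-- (`cut.getD 0` mirrors Python's `body[None:] = body[0:]`, unreachable since mx ≥ 1 there.)
def pvBLoop (rxs : List (List (String × String))) (i : Nat) (users : Int) (cut : Option Nat) (mx : Int) : Option Nat :=
  match rxs with
  | [] => none
  | m :: rest =>
    if (PySem.Dict.mk m).get? "role" = some "user" then
      if users + 1 > mx then some (cut.getD 0)
      else pvBLoop rest (i - 1) (users + 1) (some i) mx
    else pvBLoop rest (i - 1) users cut mx

def limit_conversation_history_py_alt (messages : List (List (String × String))) (max_history_length : Int) (player_name : String) : List (List (String × String)) :=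
  match messages with
  | [] => messages   -- `if not messages … : return messages`
  | m0 :: _ =>
    if max_history_length ≤ 0 then messages
    else
      let sys_part : List (List (String × String)) :=
        if (PySem.Dict.mk m0).get? "role" = some "system" then [m0] else []
      let body := PySem.List.slice messages (some (sys_part.length : Int)) none
      match pvBLoop body.reverse (body.length - 1) 0 none max_history_length with
      | some c => sys_part ++ PySem.List.slice body (some (c : Int)) none
      | none => messages

-- ===== PRECONDITION & SPEC =====
def Spec_limit_conversation_history_py (messages : List (List (String × String))) (max_history_length : Int) (player_name : String) (out : List (List (String × String))) : Prop := out = limit_conversation_history_py_alt messages max_history_length player_name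
instance (messages : List (List (String × String))) (max_history_length : Int) (player_name : String) (out : List (List (String × String))) : Decidable (Spec_limit_conversation_history_py messages max_history_length player_name out) := by unfold Spec_limit_conversation_history_py; infer_instance

-- ===== CLAIM =====
def Claim_equal_limit_conversation_history_py : Prop := ∀ (messages : List (List (String × String))) (max_history_length : Int) (player_name : String), Dom_limit_conversation_history_py messages max_history_length player_name → Spec_limit_conversation_history_py messages max_history_length player_name (limit_conversation_history_py messages max_history_length player_name)

-- ===== LEMMAS AND PROOFS =====

-- proof-side: forward positions of user messages
def pvUserPositions (xs : List (List (String × String))) (i : Nat) : List Nat :=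
  match xs with
  | [] => []
  | m :: rest =>
    if (PySem.Dict.mk m).get? "role" = some "user" then i :: pvUserPositions rest (i + 1)
    else pvUserPositions rest (i + 1)

-- proof-side: positions of user messages along a backward (descending-index) walk
def pvRevPos (xs : List (List (String × String))) (i : Nat) : List Nat :=
  match xs with
  | [] => []
  | m :: rest =>
    if (PySem.Dict.mk m).get? "role" = some "user" then i :: pvRevPos rest (i - 1)
    else pvRevPos rest (i - 1)

theorem pvUserPositions_length (xs : List (List (String × String))) (i : Nat) :
    (pvUserPositions xs i).length
      = (xs.filter (fun m => (PySem.Dict.mk m).get? "role" = some "user")).length := by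
  induction xs generalizing i with
  | nil => simp [pvUserPositions]
  | cons m rest ih =>
    by_cases h : (PySem.Dict.mk m).get? "role" = some "user" <;>
      simp [pvUserPositions, List.filter, h, ih]

-- when users_to_remove - user_count is at least the number of users left, A's loop never breaks
theorem pvALoop_no_break (xs : List (List (String × String))) (utr uc : Int) (i : Nat)
    (h : ((xs.filter (fun m => (PySem.Dict.mk m).get? "role" = some "user")).length : Int) ≤ utr - uc) :
    pvALoop xs utr uc i = 0 := by
  induction xs generalizing uc i with
  | nil => simp [pvALoop]
  | cons m rest ih =>
    by_cases hm : (PySem.Dict.mk m).get? "role" = some "user"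
    · have hlen : ((rest.filter (fun m => (PySem.Dict.mk m).get? "role" = some "user")).length : Int) + 1
          ≤ utr - uc := by
        simpa [List.filter, hm] using h
      have hle : ¬ uc + 1 > utr := by omega
      simp only [pvALoop, hm, if_neg hle, if_true]
      exact ih (uc + 1) (i + 1) (by omega)
    · simp only [pvALoop, if_neg hm]
      refine ih uc (i + 1) ?_
      simpa [List.filter, hm] using h

-- A's loop breaks at the position of the (users_to_remove - user_count + 1)-th remaining user
theorem pvALoop_break (xs : List (List (String × String))) (utr uc : Int) (i : Nat)
    (h0 : 0 ≤ utr - uc)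
    (h1 : utr - uc < ((xs.filter (fun m => (PySem.Dict.mk m).get? "role" = some "user")).length : Int)) :
    pvALoop xs utr uc i = (pvUserPositions xs i).getD (utr - uc).toNat 0 := by
  induction xs generalizing uc i with
  | nil => simp [List.filter] at h1; omega
  | cons m rest ih =>
    by_cases hm : (PySem.Dict.mk m).get? "role" = some "user"
    · by_cases hbr : uc + 1 > utr
      · have : (utr - uc).toNat = 0 := by omega
        simp [pvALoop, pvUserPositions, hm, hbr, this]
      · have hnat : (utr - uc).toNat = ((utr - (uc + 1)).toNat) + 1 := by omega
        have hrec := ih (uc + 1) (i + 1) (by omega)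
          (by
            have : ((rest.filter (fun m => (PySem.Dict.mk m).get? "role" = some "user")).length : Int) + 1
                = ((List.filter (fun m => decide ((PySem.Dict.mk m).get? "role" = some "user")) (m :: rest)).length : Int) := by
              simp [List.filter, hm]
            omega)
        simp only [pvALoop, pvUserPositions, hm, if_neg hbr, if_true, hnat]
        simpa using hrec
    · have hfil : (List.filter (fun m => decide ((PySem.Dict.mk m).get? "role" = some "user")) (m :: rest))
          = rest.filter (fun m => decide ((PySem.Dict.mk m).get? "role" = some "user")) := by
        simp [List.filter, hm]
      simp only [pvALoop, pvUserPositions, if_neg hm]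
      exact ih uc (i + 1) h0 (by rw [hfil] at h1; exact h1)

-- B's loop completes (returns none) when at most mx - users users remain
theorem pvBLoop_none (rxs : List (List (String × String))) (i : Nat) (users : Int) (cut : Option Nat) (mx : Int)
    (h : ((rxs.filter (fun m => (PySem.Dict.mk m).get? "role" = some "user")).length : Int) ≤ mx - users) :
    pvBLoop rxs i users cut mx = none := by
  induction rxs generalizing i users cut with
  | nil => simp [pvBLoop]
  | cons m rest ih =>
    by_cases hm : (PySem.Dict.mk m).get? "role" = some "user"
    · have hlen : ((rest.filter (fun m => (PySem.Dict.mk m).get? "role" = some "user")).length : Int) + 1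
          ≤ mx - users := by simpa [List.filter, hm] using h
      have hle : ¬ users + 1 > mx := by omega
      simp only [pvBLoop, hm, if_neg hle, if_true]
      exact ih (i - 1) (users + 1) (some i) (by omega)
    · simp only [pvBLoop, if_neg hm]
      refine ih (i - 1) users cut ?_
      simpa [List.filter, hm] using h

-- when the budget is already exhausted, B's loop breaks at the first user and returns the carried cut
theorem pvBLoop_cut (rxs : List (List (String × String))) (i : Nat) (users : Int) (cut : Option Nat) (mx : Int)
    (h0 : mx - users ≤ 0)
    (h1 : 0 < (rxs.filter (fun m => (PySem.Dict.mk m).get? "role" = some "user")).length) :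
    pvBLoop rxs i users cut mx = some (cut.getD 0) := by
  induction rxs generalizing i with
  | nil => simp [List.filter] at h1
  | cons m rest ih =>
    by_cases hm : (PySem.Dict.mk m).get? "role" = some "user"
    · have hbr : users + 1 > mx := by omega
      simp [pvBLoop, hm, hbr]
    · simp only [pvBLoop, if_neg hm]
      refine ih (i - 1) ?_
      simpa [List.filter, hm] using h1

-- B's loop breaks at the (mx - users + 1)-th user of the backward walk and returns the
-- position of the (mx - users)-th user seen
theorem pvBLoop_break (rxs : List (List (String × String))) (i : Nat) (users : Int) (cut : Option Nat) (mx : Int)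
    (h0 : 1 ≤ mx - users)
    (h1 : mx - users < ((rxs.filter (fun m => (PySem.Dict.mk m).get? "role" = some "user")).length : Int)) :
    pvBLoop rxs i users cut mx = some ((pvRevPos rxs i).getD ((mx - users).toNat - 1) 0) := by
  induction rxs generalizing i users cut with
  | nil => simp [List.filter] at h1; omega
  | cons m rest ih =>
    by_cases hm : (PySem.Dict.mk m).get? "role" = some "user"
    · have hbr : ¬ users + 1 > mx := by omega
      have hlen : ((rest.filter (fun m => (PySem.Dict.mk m).get? "role" = some "user")).length : Int) + 1
          = ((List.filter (fun m => decide ((PySem.Dict.mk m).get? "role" = some "user")) (m :: rest)).length : Int) := by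
        simp [List.filter, hm]
      by_cases ht : mx - (users + 1) ≤ 0
      · -- next recursion is in the exhausted regime; it returns the cut just set, i.e. i
        have h1' : 0 < (rest.filter (fun m => (PySem.Dict.mk m).get? "role" = some "user")).length := by
          omega
        have hz : (mx - users).toNat - 1 = 0 := by omega
        simp only [pvBLoop, pvRevPos, hm, if_neg hbr, if_true, hz]
        rw [pvBLoop_cut rest (i - 1) (users + 1) (some i) mx (by omega) h1']
        simp
      · have hrec := ih (i - 1) (users + 1) (some i) (by omega) (by omega)
        have hnat : (mx - users).toNat - 1 = ((mx - (users + 1)).toNat - 1) + 1 := by omega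
        simp only [pvBLoop, pvRevPos, hm, if_neg hbr, if_true, hnat]
        rw [hrec]
        simp
    · have hfil : (List.filter (fun m => decide ((PySem.Dict.mk m).get? "role" = some "user")) (m :: rest))
          = rest.filter (fun m => decide ((PySem.Dict.mk m).get? "role" = some "user")) := by
        simp [List.filter, hm]
      simp only [pvBLoop, pvRevPos, if_neg hm]
      exact ih (i - 1) users cut h0 (by rw [hfil] at h1; exact h1)

theorem pvRevPos_append (ys zs : List (List (String × String))) (i : Nat) :
    pvRevPos (ys ++ zs) i = pvRevPos ys i ++ pvRevPos zs (i - ys.length) := by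
  induction ys generalizing i with
  | nil => simp [pvRevPos]
  | cons m rest ih =>
    by_cases hm : (PySem.Dict.mk m).get? "role" = some "user" <;>
      simp [pvRevPos, hm, ih, Nat.sub_sub, Nat.add_comm]

-- the backward walk over the reversed body visits the user positions in reverse order
theorem pvRevPos_reverse (c : List (String × String)) (cs : List (List (String × String))) (b : Nat) :
    pvRevPos (c :: cs).reverse (cs.length + b) = (pvUserPositions (c :: cs) b).reverse := by
  induction cs generalizing c b with
  | nil =>
    by_cases hm : (PySem.Dict.mk c).get? "role" = some "user" <;>
      simp [pvRevPos, pvUserPositions, hm]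
  | cons d ds ih =>
    have hrw : (c :: d :: ds).reverse = (d :: ds).reverse ++ [c] := by simp
    have h1 : ds.length + 1 + b = ds.length + (b + 1) := by omega
    calc pvRevPos (c :: d :: ds).reverse ((d :: ds).length + b)
        = pvRevPos ((d :: ds).reverse ++ [c]) (ds.length + 1 + b) := by rw [hrw]; rfl
      _ = pvRevPos (d :: ds).reverse (ds.length + 1 + b)
            ++ pvRevPos [c] (ds.length + 1 + b - (d :: ds).reverse.length) := pvRevPos_append _ _ _
      _ = (pvUserPositions (d :: ds) (b + 1)).reverse ++ pvRevPos [c] b := by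
          have h3 : ds.length + 1 + b - (d :: ds).reverse.length = b := by simp
          rw [h3, h1, ih]
      _ = (pvUserPositions (c :: d :: ds) b).reverse := by
          by_cases hm : (PySem.Dict.mk c).get? "role" = some "user" <;>
            simp [pvRevPos, pvUserPositions, hm]

theorem pvGetD_reverse (l : List Nat) (i : Nat) (h : i < l.length) :
    l.reverse.getD i 0 = l.getD (l.length - 1 - i) 0 := by
  rw [List.getD_eq_getElem?_getD, List.getD_eq_getElem?_getD, List.getElem?_reverse h]

-- the shared trim decision: B's backward scan returns none exactly when A keeps everything,
-- and otherwise returns A's cutoff index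
theorem pv_core (ns : List (List (String × String))) (mx : Int) (hmx : 1 ≤ mx) :
    pvBLoop ns.reverse (ns.length - 1) 0 none mx
      = if ((ns.filter (fun m => (PySem.Dict.mk m).get? "role" = some "user")).length : Int) ≤ mx
        then none
        else some (pvALoop ns (((ns.filter (fun m => (PySem.Dict.mk m).get? "role" = some "user")).length : Int) - mx) 0 0) := by
  split_ifs with hk
  · refine pvBLoop_none _ _ _ _ _ ?_
    rw [List.filter_reverse, List.length_reverse]; omega
  · match ns with
    | [] => simp [List.filter] at hk; omega
    | c :: cs =>
      set P := pvUserPositions (c :: cs) 0 with hP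
      have hPlen : P.length
          = ((c :: cs).filter (fun m => (PySem.Dict.mk m).get? "role" = some "user")).length :=
        pvUserPositions_length _ _
      have hklen : mx.toNat < P.length := by omega
      have hb := pvBLoop_break (c :: cs).reverse cs.length 0 none mx (by omega) (by
        rw [List.filter_reverse, List.length_reverse]; omega)
      have ha := pvALoop_break (c :: cs)
        (((List.filter (fun m => (PySem.Dict.mk m).get? "role" = some "user") (c :: cs)).length : Int) - mx)
        0 0 (by omega) (by omega)
      simp only [Int.sub_zero] at hb ha
      have hrev : pvRevPos (c :: cs).reverse cs.length = P.reverse := by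
        have := pvRevPos_reverse c cs 0
        simpa using this
      have hlen1 : (c :: cs).length - 1 = cs.length := by simp
      rw [hlen1, hb, hrev, ha]
      have hidx : P.length - 1 - (mx.toNat - 1)
          = (((List.filter (fun m => (PySem.Dict.mk m).get? "role" = some "user") (c :: cs)).length : Int) - mx).toNat := by
        omega
      rw [pvGetD_reverse P (mx.toNat - 1) (by omega), hidx]

theorem limit_conversation_history_py_eq_alt (messages : List (List (String × String))) (max_history_length : Int) (player_name : String) :
    limit_conversation_history_py messages max_history_length player_name
      = limit_conversation_history_py_alt messages max_history_length player_name := by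
  match messages with
  | [] => rfl
  | m0 :: rest =>
    simp only [limit_conversation_history_py, limit_conversation_history_py_alt]
    by_cases hs : (PySem.Dict.mk m0).get? "role" = some "system" <;>
      by_cases hmx : max_history_length ≤ 0
    -- hs, mx ≤ 0: both return messages (A never breaks, cutoff 0)
    · simp only [hs, ite_true, Option.isSome_some, if_true, Option.getD_some,
        PySem.List.slice_from_one, List.tail_cons]
      rw [if_pos hmx]
      split_ifs with hk
      · rfl
      · rw [pvALoop_no_break rest _ 0 0 (by omega), PySem.List.slice_from_natCast]
        simp
    -- hs, mx ≥ 1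
    · simp only [hs, ite_true, Option.isSome_some, if_true, Option.getD_some,
        PySem.List.slice_from_one, List.tail_cons]
      rw [if_neg hmx]
      have hbody : PySem.List.slice (m0 :: rest)
          (some ((([m0] : List (List (String × String))).length : Int))) none = rest := by
        rw [PySem.List.slice_from_natCast]; simp
      rw [hbody, pv_core rest max_history_length (by omega)]
      split_ifs with hk
      · rfl
      · simp
    -- ¬hs, mx ≤ 0
    · simp only [hs, ite_false, Option.isSome_none, Bool.false_eq_true, if_false]
      rw [if_pos hmx]
      split_ifs with hk
      · rfl
      · rw [pvALoop_no_break (m0 :: rest) _ 0 0 (by omega), PySem.List.slice_from_natCast]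
        simp
    -- ¬hs, mx ≥ 1
    · simp only [hs, ite_false, Option.isSome_none, Bool.false_eq_true, if_false]
      rw [if_neg hmx]
      have hbody : PySem.List.slice (m0 :: rest)
          (some ((([] : List (List (String × String))).length : Int))) none = m0 :: rest := by
        rw [PySem.List.slice_from_natCast]; simp
      rw [hbody, pv_core (m0 :: rest) max_history_length (by omega)]
      split_ifs with hk
      · rfl
      · simp

-- ===== VERDICT =====
theorem limit_conversation_history_py_spec : Claim_equal_limit_conversation_history_py := by
  intro messages max_history_length player_name _
  exact limit_conversation_history_py_eq_alt messages max_history_length player_name
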